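-- pv_equiv track=rewrite | github.com/RDLLab/benevolent-deception-gym | bdgym/scripts/drl_utils.py | get_train_epoch_lengths
-- ===== SOURCE A (Python) =====
-- from typing import List
--
-- def get_train_epoch_lengths(save_frequency: int,
--                             total_timesteps: int) -> List[int]:
--     """Get the lengths of learning epochs. Here One epoch is the number
--     of timesteps between when the model is saved.
--     """
--     if save_frequency <= 0:
--         epoch_lengths = [total_timesteps]
--     else:
--         epoch_lengths = []
--         remaining_timesteps = total_timesteps
--         while remaining_timesteps > 0:
--             epoch_lengths.append(min(remaining_timesteps, save_frequency))
--             remaining_timesteps -= save_frequency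
--     return epoch_lengths
-- ===== SOURCE B (Python) =====
-- def get_train_epoch_lengths(save_frequency: int, total_timesteps: int):
--     """Closed-form chunking: divmod instead of a subtract-in-a-loop accumulation."""
--     if save_frequency <= 0:
--         return [total_timesteps]
--     if total_timesteps <= 0:
--         return []
--     full, rem = divmod(total_timesteps, save_frequency)
--     return [save_frequency] * full + ([rem] if rem else [])
-- ===== Notes on version B (the rewrite author's own statement) =====
-- stated objective: simpler
-- what changed: Replaces the subtract-until-nonpositive while loop with a closed-form divmod: [save_frequency]*full plus the nonzero remainder.
import Mathlib
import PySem

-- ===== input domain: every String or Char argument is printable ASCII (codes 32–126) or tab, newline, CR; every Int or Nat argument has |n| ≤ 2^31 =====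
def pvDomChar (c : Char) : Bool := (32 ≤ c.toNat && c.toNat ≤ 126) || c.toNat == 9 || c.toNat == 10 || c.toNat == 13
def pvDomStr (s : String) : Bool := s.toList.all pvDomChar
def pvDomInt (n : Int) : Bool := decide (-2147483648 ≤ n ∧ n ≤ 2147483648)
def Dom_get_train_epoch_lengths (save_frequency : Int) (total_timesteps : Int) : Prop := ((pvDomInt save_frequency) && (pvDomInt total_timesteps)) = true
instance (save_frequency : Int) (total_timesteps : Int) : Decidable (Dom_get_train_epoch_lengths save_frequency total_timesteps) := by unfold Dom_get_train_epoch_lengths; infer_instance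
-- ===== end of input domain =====

-- B replaces A's subtract-in-a-loop accumulation with a closed-form divmod chunk list (simpler).

-- ===== PORT A =====
-- A's while loop; the `0 < save_frequency` conjunct in the guard only makes the
-- recursion total (A only runs the loop with save_frequency > 0).
def pvALoop (save_frequency : Int) (remaining_timesteps : Int) (epoch_lengths : List Int) : List Int :=
  if _h : 0 < remaining_timesteps ∧ 0 < save_frequency then
    pvALoop save_frequency (remaining_timesteps - save_frequency)
      (epoch_lengths ++ [min remaining_timesteps save_frequency])
  else epoch_lengths
termination_by remaining_timesteps.toNat
decreasing_by omega

def get_train_epoch_lengths (save_frequency : Int) (total_timesteps : Int) : List Int :=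
  if save_frequency ≤ 0 then [total_timesteps]
  else pvALoop save_frequency total_timesteps []

-- ===== PORT B =====
def get_train_epoch_lengths_alt (save_frequency : Int) (total_timesteps : Int) : List Int :=
  if save_frequency ≤ 0 then [total_timesteps]
  else if total_timesteps ≤ 0 then []
  else
    let full := PySem.Int.floordiv total_timesteps save_frequency
    let rem := PySem.Int.mod total_timesteps save_frequency
    List.replicate full.toNat save_frequency ++ (if rem = 0 then [] else [rem])

-- ===== PRECONDITION & SPEC =====
def Spec_get_train_epoch_lengths (save_frequency : Int) (total_timesteps : Int) (out : List Int) : Prop := out = get_train_epoch_lengths_alt save_frequency total_timesteps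
instance (save_frequency : Int) (total_timesteps : Int) (out : List Int) : Decidable (Spec_get_train_epoch_lengths save_frequency total_timesteps out) := by unfold Spec_get_train_epoch_lengths; infer_instance

-- ===== CLAIM (what is proved, stated in full; the proofs are below) =====
def Claim_equal_get_train_epoch_lengths : Prop := ∀ (save_frequency : Int) (total_timesteps : Int), Dom_get_train_epoch_lengths save_frequency total_timesteps → Spec_get_train_epoch_lengths save_frequency total_timesteps (get_train_epoch_lengths save_frequency total_timesteps)

-- ===== LEMMAS AND PROOFS =====

-- the closed-form chunk list of B's positive branch
def pvChunks (sf t : Int) : List Int :=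
  List.replicate (PySem.Int.floordiv t sf).toNat sf ++
    (if PySem.Int.mod t sf = 0 then [] else [PySem.Int.mod t sf])

theorem pvChunks_step (sf t : Int) (hsf : 0 < sf) (ht : 0 < t) :
    pvChunks sf t = min t sf :: (if t - sf ≤ 0 then [] else pvChunks sf (t - sf)) := by
  rw [pvChunks]
  rw [PySem.Int.floordiv_eq_ediv_of_pos hsf, PySem.Int.mod_eq_emod_of_pos hsf]
  by_cases hle : t - sf ≤ 0
  · simp only [if_pos hle]
    by_cases heq : t = sf
    · subst heq
      have h1 : t / t = 1 := Int.ediv_self (by omega)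
      have h2 : t % t = 0 := Int.emod_self
      simp [h1, min_self]
    · -- 0 < t < sf
      have h1 : t / sf = 0 := Int.ediv_eq_zero_of_lt (by omega) (by omega)
      have h2 : t % sf = t := Int.emod_eq_of_lt (by omega) (by omega)
      have h3 : min t sf = t := by omega
      simp [h1, h2, h3, ht.ne']
  · -- sf < t
    rw [pvChunks, PySem.Int.floordiv_eq_ediv_of_pos hsf, PySem.Int.mod_eq_emod_of_pos hsf]
    simp only [if_neg (by omega : ¬ t - sf ≤ 0)]
    have hdiv : t / sf = (t - sf) / sf + 1 := by
      have h := Int.add_mul_ediv_right (t - sf) 1 (show sf ≠ 0 by omega)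
      have he : t - sf + 1 * sf = t := by ring
      rw [he] at h
      omega
    have hmod : t % sf = (t - sf) % sf := (Int.sub_emod_right t sf).symm
    have hdivpos : 0 ≤ (t - sf) / sf := Int.ediv_nonneg (by omega) (by omega)
    have htn : (t / sf).toNat = ((t - sf) / sf).toNat + 1 := by omega
    have hmin : min t sf = sf := by omega
    rw [htn, hmod, hmin, List.replicate_succ]
    simp

theorem pvALoop_eq (sf : Int) (hsf : 0 < sf) :
    ∀ t acc, pvALoop sf t acc = acc ++ (if t ≤ 0 then [] else pvChunks sf t) := by
  intro t acc
  induction hn : t.toNat using Nat.strong_induction_on generalizing t acc with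
  | _ n ih =>
    by_cases ht : 0 < t
    · rw [pvALoop, dif_pos ⟨ht, hsf⟩]
      rw [ih (t - sf).toNat (by omega) (t - sf) _ rfl]
      rw [if_neg (by omega : ¬ t ≤ 0), pvChunks_step sf t hsf ht]
      by_cases hle : t - sf ≤ 0
      · simp [hle]
      · simp [hle]
    · rw [pvALoop, dif_neg (by omega)]
      rw [if_pos (by omega : t ≤ 0)]
      simp

-- ===== VERDICT (by name: the statement is the Claim_ definition above) =====
theorem get_train_epoch_lengths_spec : Claim_equal_get_train_epoch_lengths := by
  intro sf t _
  unfold Spec_get_train_epoch_lengths get_train_epoch_lengths get_train_epoch_lengths_alt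
  by_cases hsf : sf ≤ 0
  · simp [hsf]
  · replace hsf : 0 < sf := by omega
    rw [if_neg (by omega), if_neg (by omega)]
    rw [pvALoop_eq sf hsf t []]
    by_cases ht : t ≤ 0
    · simp [ht]
    · simp only [if_neg ht, List.nil_append]
      rfl
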